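-- pv_equiv track=rewrite | github.com/animesh/alphapeptdeep | peptdeep/protein/fasta.py | get_var_mod_sites
-- ===== SOURCE A (Python) =====
-- import itertools
--
-- def get_candidate_sites(
--     sequence:str, target_mod_aas:str
-- )->list:
--     """get candidate modification sites
--
--     Args:
--         sequence (str): peptide sequence
--         target_mod_aas (str): AAs that may have modifications
--
--     Returns:
--         list: candiadte mod sites in alphabase format (0: N-term, -1: C-term, 1-n:others)
--     """
--     candidate_sites = []
--     for i,aa in enumerate(sequence):
--         if aa in target_mod_aas:
--             candidate_sites.append(i+1) #alphabase mod sites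
--     return candidate_sites
--
-- def get_var_mod_sites(
--     sequence:str,
--     target_mod_aas:str,
--     max_var_mod: int,
--     max_combs: int
-- )->list:
--     """get all combinations of variable modification sites
--
--     Args:
--         sequence (str): peptide sequence
--         target_mod_aas (str): AAs that may have modifications
--         max_var_mod (int): max number of mods in a sequence
--         max_combs (int): max number of combinations for a sequence
--
--     Returns:
--         list: list of combinations of (tuple) modification sites
--     """
--     candidate_sites = get_candidate_sites(
--         sequence, target_mod_aas
--     )
--     mod_sites = [(s,) for s in candidate_sites]
--     for n_var_mod in range(2, max_var_mod+1):
--         if len(mod_sites)>=max_combs: break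
--         mod_sites.extend(
--             itertools.islice(
--                 itertools.combinations(
--                     candidate_sites, n_var_mod
--                 ),
--                 max_combs-len(mod_sites)
--             )
--         )
--     return mod_sites
-- ===== SOURCE B (Python) =====
-- def _next_layer(layer, sites, room):
--     # grow each (combo, last_index) by one later site; stop as soon as room items exist
--     nxt = []
--     for combo, j in layer:
--         for k in range(j + 1, len(sites)):
--             nxt.append((combo + (sites[k],), k))
--             if len(nxt) == room:
--                 return nxt
--     return nxt
--
--
-- def get_var_mod_sites(sequence, target_mod_aas, max_var_mod, max_combs):
--     sites = [i + 1 for i, aa in enumerate(sequence) if aa in target_mod_aas]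
--     result = [(s,) for s in sites]
--     layer = [((s,), j) for j, s in enumerate(sites)]
--     n = 2
--     while n <= max_var_mod and len(result) < max_combs and layer:
--         nxt = _next_layer(layer, sites, max_combs - len(result))
--         result.extend(c for c, _ in nxt)
--         layer = nxt
--         n += 1
--     return result
-- ===== Notes on version B (the rewrite author's own statement) =====
-- stated objective: alternative
-- what changed: Replaces A's per-size calls to itertools.combinations with a layered dynamic construction: each order-n layer pairs every combination with its remaining usable suffix of sites and the next layer is built by extending each pair, so combinations are grown incrementally instead of regenerated from scratch, and the loop stops as soon as a layer is empty.
import Mathlib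
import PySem

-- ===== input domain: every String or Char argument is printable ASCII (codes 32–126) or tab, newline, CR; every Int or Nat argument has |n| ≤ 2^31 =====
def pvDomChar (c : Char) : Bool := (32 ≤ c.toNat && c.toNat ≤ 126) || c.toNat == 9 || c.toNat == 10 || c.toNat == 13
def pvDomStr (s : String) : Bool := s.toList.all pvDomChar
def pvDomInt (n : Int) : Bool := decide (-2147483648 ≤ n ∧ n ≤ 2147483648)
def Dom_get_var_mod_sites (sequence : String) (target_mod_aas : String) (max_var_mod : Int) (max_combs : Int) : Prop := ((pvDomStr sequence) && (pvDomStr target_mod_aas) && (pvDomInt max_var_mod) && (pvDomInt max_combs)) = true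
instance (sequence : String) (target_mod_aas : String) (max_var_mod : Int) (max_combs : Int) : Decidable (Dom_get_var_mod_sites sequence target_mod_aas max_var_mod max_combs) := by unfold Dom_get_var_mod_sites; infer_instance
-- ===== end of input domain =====

-- ===== PORT A =====
-- B replaces A's per-size itertools.combinations calls with a layered construction:
-- each layer pairs every combination with its last site index and the next layer extends
-- each pair by one later site, stopping at the room limit. Equal return value, similar cost.

-- hand port of itertools.combinations(xs, n) (lexicographic index order); exact
def pyCombinations : List Int → Nat → List (List Int)
  | _, 0 => [[]]
  | [], _+1 => []
  | x :: xs, n+1 => (pyCombinations xs n).map (x :: ·) ++ pyCombinations xs (n+1)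

-- A: candidate_sites loop ('aa in target_mod_aas' with aa a single char = char membership; exact)
def get_candidate_sites (sequence : String) (target_mod_aas : String) : List Int :=
  (PySem.List.enumerate sequence.toList 0).foldl
    (fun acc p => if target_mod_aas.toList.contains p.2 then acc ++ [p.1 + 1] else acc) []

-- A's for-loop; 'break' is modeled by the guard: once len ≥ max_combs it stays so
def get_var_mod_sites (sequence : String) (target_mod_aas : String) (max_var_mod : Int) (max_combs : Int) : List (List Int) :=
  let candidate_sites := get_candidate_sites sequence target_mod_aas
  let mod_sites := candidate_sites.map (fun s => [s])
  (PySem.List.pyRange 2 (max_var_mod + 1) 1).foldl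
    (fun ms n =>
      if max_combs ≤ (ms.length : Int) then ms
      else ms ++ (pyCombinations candidate_sites n.toNat).take (max_combs - (ms.length : Int)).toNat)
    mod_sites

-- ===== PORT B =====
-- _next_layer's inner 'for k in range(j+1, len(sites))' with the capped early return;
-- sites[k] has 0 ≤ k < len(sites) here, so pyGetD with default 0 is exact
def bInner (sites : List Int) (room : Int) (c : List Int) :
    List Int → List (List Int × Int) → (List (List Int × Int)) × Bool
  | [], nxt => (nxt, false)
  | k :: ks, nxt =>
      let nxt := nxt ++ [(c ++ [PySem.List.pyGetD sites k 0], k)]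
      if (nxt.length : Int) = room then (nxt, true) else bInner sites room c ks nxt

-- _next_layer's outer loop; the Bool signals the 'return nxt' out of both loops
def bNext (sites : List Int) (room : Int) :
    List (List Int × Int) → List (List Int × Int) → List (List Int × Int)
  | [], nxt => nxt
  | p :: rest, nxt =>
      let r := bInner sites room p.1 (PySem.List.pyRange (p.2 + 1) (sites.length : Int) 1) nxt
      if r.2 then r.1 else bNext sites room rest r.1

-- Source B's while loop; fuel = number of remaining values of n (n = 2 .. max_var_mod)
def bLoop (sites : List Int) (max_combs : Int) :
    Nat → List (List Int) → List (List Int × Int) → List (List Int)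
  | 0, result, _ => result
  | fuel+1, result, layer =>
    if max_combs ≤ (result.length : Int) ∨ layer = [] then result
    else
      let nxt := bNext sites (max_combs - (result.length : Int)) layer []
      bLoop sites max_combs fuel (result ++ nxt.map Prod.fst) nxt

def get_var_mod_sites_alt (sequence : String) (target_mod_aas : String) (max_var_mod : Int) (max_combs : Int) : List (List Int) :=
  let sites := (PySem.List.enumerate sequence.toList 0).filterMap
    (fun p => if target_mod_aas.toList.contains p.2 then some (p.1 + 1) else none)
  let result := sites.map (fun s => [s])
  let layer := (PySem.List.enumerate sites 0).map (fun p => ([p.2], p.1))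
  bLoop sites max_combs (max_var_mod - 1).toNat result layer

-- ===== PRECONDITION & SPEC =====
def Spec_get_var_mod_sites (sequence : String) (target_mod_aas : String) (max_var_mod : Int) (max_combs : Int) (out : List (List Int)) : Prop := out = get_var_mod_sites_alt sequence target_mod_aas max_var_mod max_combs
instance (sequence : String) (target_mod_aas : String) (max_var_mod : Int) (max_combs : Int) (out : List (List Int)) : Decidable (Spec_get_var_mod_sites sequence target_mod_aas max_var_mod max_combs out) := by unfold Spec_get_var_mod_sites; infer_instance

-- ===== CLAIM =====
def Claim_equal_get_var_mod_sites : Prop := ∀ (sequence : String) (target_mod_aas : String) (max_var_mod : Int) (max_combs : Int), Dom_get_var_mod_sites sequence target_mod_aas max_var_mod max_combs → Spec_get_var_mod_sites sequence target_mod_aas max_var_mod max_combs (get_var_mod_sites sequence target_mod_aas max_var_mod max_combs)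

-- ===== LEMMAS AND PROOFS =====

-- rest-list view of a layer element: a combo together with the usable tail of sites
def bExt (c : List Int) : List Int → List (List Int × List Int)
  | [] => []
  | s :: rest => (c ++ [s], rest) :: bExt c rest

-- combos of size n, each paired with the tail of sites after its last element
def pyCombR : List Int → Nat → List (List Int × List Int)
  | xs, 0 => [([], xs)]
  | [], _+1 => []
  | x :: xs, n+1 => (pyCombR xs n).map (fun p => (x :: p.1, p.2)) ++ pyCombR xs (n+1)

theorem bExt_eq (c : List Int) : ∀ r : List Int,
    bExt c r = (pyCombR r 1).map (fun p => (c ++ p.1, p.2)) := by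
  intro r
  induction r with
  | nil => simp [bExt, pyCombR]
  | cons s rest ih => simp [bExt, pyCombR, ih]

theorem pyCombR_step : ∀ (xs : List Int) (n : Nat),
    (pyCombR xs n).flatMap (fun p => bExt p.1 p.2) = pyCombR xs (n+1) := by
  intro xs
  induction xs with
  | nil =>
      intro n
      cases n with
      | zero => simp [pyCombR, bExt]
      | succ m => simp [pyCombR]
  | cons x t ih =>
      intro n
      cases n with
      | zero =>
          simp only [pyCombR, List.flatMap_cons, List.flatMap_nil, List.append_nil]
          rw [bExt_eq]
          simp [pyCombR]
      | succ m =>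
          simp only [pyCombR, List.flatMap_append, List.flatMap_map, ih (m+1)]
          congr 1
          have h1 : ∀ p : List Int × List Int,
              bExt (x :: p.1) p.2 = (bExt p.1 p.2).map (fun q => (x :: q.1, q.2)) := by
            intro p
            rw [bExt_eq, bExt_eq, List.map_map]
            rfl
          calc (pyCombR t m).flatMap (fun p => bExt (x :: p.1) p.2)
              = (pyCombR t m).flatMap (fun p => (bExt p.1 p.2).map (fun q => (x :: q.1, q.2))) := by
                simp only [h1]
            _ = ((pyCombR t m).flatMap (fun p => bExt p.1 p.2)).map (fun q => (x :: q.1, q.2)) := by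
                rw [List.map_flatMap]
            _ = (pyCombR t (m+1)).map (fun q => (x :: q.1, q.2)) := by rw [ih m]

theorem pyCombR_fst : ∀ (xs : List Int) (n : Nat),
    (pyCombR xs n).map Prod.fst = pyCombinations xs n := by
  intro xs
  induction xs with
  | nil => intro n; cases n <;> simp [pyCombR, pyCombinations]
  | cons x t ih =>
      intro n
      cases n with
      | zero => simp [pyCombR, pyCombinations]
      | succ m =>
          simp only [pyCombR, pyCombinations, List.map_append, List.map_map, ← ih]
          rfl

-- the flat list of combination lists the layered process would produce with unlimited room
def layersCat : Nat → List (List Int × List Int) → List (List Int)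
  | 0, _ => []
  | f+1, layer =>
      let nxt := layer.flatMap (fun p => bExt p.1 p.2)
      nxt.map Prod.fst ++ layersCat f nxt

theorem layersCat_nil : ∀ f, layersCat f ([] : List (List Int × List Int)) = [] := by
  intro f
  induction f with
  | zero => simp [layersCat]
  | succ f ih => simp [layersCat, ih]

theorem layersCat_pyCombR (sites : List Int) : ∀ (fuel m : Nat),
    layersCat fuel (pyCombR sites m)
      = (List.range fuel).flatMap (fun i => pyCombinations sites (m + 1 + i)) := by
  intro fuel
  induction fuel with
  | zero => intro m; simp [layersCat]
  | succ f ih =>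
      intro m
      simp only [layersCat, pyCombR_step, pyCombR_fst]
      rw [List.range_succ_eq_map, List.flatMap_cons, List.flatMap_map]
      congr 1
      rw [ih (m+1)]
      congr 1
      funext i
      congr 1
      omega

-- index-form layer abstracted to its rest-list form
def layAbs (sites : List Int) (L : List (List Int × Int)) : List (List Int × List Int) :=
  L.map (fun p => (p.1, sites.drop (p.2 + 1).toNat))

-- the extension list of one combo, generated from start index a, in index form
def extIdx (sites : List Int) (c : List Int) (a : Int) : List (List Int × Int) :=
  (PySem.List.pyRange a (sites.length : Int) 1).map
    (fun k => (c ++ [PySem.List.pyGetD sites k 0], k))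

-- the full (uncapped) next layer in index form
def fullNext (sites : List Int) (L : List (List Int × Int)) : List (List Int × Int) :=
  L.flatMap (fun p => extIdx sites p.1 (p.2 + 1))

theorem extIdx_abs (sites : List Int) (c : List Int) :
    ∀ (n : Nat) (a : Int), 0 ≤ a → (sites.length : Int) - a ≤ (n : Int) →
      (extIdx sites c a).map (fun p => (p.1, sites.drop (p.2 + 1).toNat))
        = bExt c (sites.drop a.toNat) := by
  intro n
  induction n with
  | zero =>
      intro a ha hn
      have h1 : (sites.length : Int) ≤ a := by omega
      have h2 : sites.length ≤ a.toNat := by omega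
      rw [extIdx, PySem.List.pyRange_one_eq_nil h1, List.map_nil, List.map_nil,
        List.drop_eq_nil_of_le h2, bExt]
  | succ n ih =>
      intro a ha hn
      by_cases hlt : a < (sites.length : Int)
      · rw [extIdx, PySem.List.pyRange_one_cons hlt, List.map_cons, List.map_cons]
        have hdrop : sites.drop a.toNat
            = PySem.List.pyGetD sites a 0 :: sites.drop (a + 1).toNat := by
          have hidx : a.toNat < sites.length := by omega
          have hnat : (a + 1).toNat = a.toNat + 1 := by omega
          rw [PySem.List.pyGetD_eq_getElem sites 0 ha hlt, hnat, List.drop_eq_getElem_cons hidx]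
        rw [hdrop, bExt, ← ih (a + 1) (by omega) (by omega), extIdx]
      · have h1 : (sites.length : Int) ≤ a := by omega
        have h2 : sites.length ≤ a.toNat := by omega
        rw [extIdx, PySem.List.pyRange_one_eq_nil h1, List.map_nil, List.map_nil,
          List.drop_eq_nil_of_le h2, bExt]

theorem fullNext_abs (sites : List Int) :
    ∀ L : List (List Int × Int), (∀ p ∈ L, 0 ≤ p.2) →
      layAbs sites (fullNext sites L) = (layAbs sites L).flatMap (fun p => bExt p.1 p.2) := by
  intro L
  induction L with
  | nil => intro _; simp [layAbs, fullNext]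
  | cons q rest ih =>
      intro h
      have hq : 0 ≤ q.2 := h q (List.mem_cons_self)
      have hrest : ∀ p ∈ rest, 0 ≤ p.2 := fun p hp => h p (List.mem_cons_of_mem _ hp)
      simp only [layAbs, fullNext, List.flatMap_cons, List.map_append, List.map_cons] at *
      rw [ih hrest]
      congr 1
      exact extIdx_abs sites q.1 sites.length (q.2 + 1) (by omega)
        (by simp; omega)

theorem fullNext_nonneg (sites : List Int) (L : List (List Int × Int))
    (hL : ∀ p ∈ L, 0 ≤ p.2) : ∀ p ∈ fullNext sites L, 0 ≤ p.2 := by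
  intro p hp
  rw [fullNext, List.mem_flatMap] at hp
  obtain ⟨q, hq, hpq⟩ := hp
  rw [extIdx, List.mem_map] at hpq
  obtain ⟨k, hk, rfl⟩ := hpq
  rw [PySem.List.mem_pyRange_one] at hk
  have := hL q hq
  simp
  omega

theorem layAbs_fst (sites : List Int) (L : List (List Int × Int)) :
    (layAbs sites L).map Prod.fst = L.map Prod.fst := by
  rw [layAbs, List.map_map]
  rfl

theorem bInner_spec (sites : List Int) (room : Int) (c : List Int) :
    ∀ (ks : List Int) (nxt : List (List Int × Int)), (nxt.length : Int) < room →
      bInner sites room c ks nxt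
        = (nxt ++ (ks.map (fun k => (c ++ [PySem.List.pyGetD sites k 0], k))).take
              (room - (nxt.length : Int)).toNat,
           decide (room ≤ (nxt.length : Int) + (ks.length : Int))) := by
  intro ks
  induction ks with
  | nil =>
      intro nxt h
      simp only [bInner, List.map_nil, List.take_nil, List.append_nil]
      refine Prod.ext rfl ?_
      exact (decide_eq_false (by simp only [List.length_nil]; push_cast; omega)).symm
  | cons k ks ih =>
      intro nxt h
      by_cases heq : ((nxt ++ [(c ++ [PySem.List.pyGetD sites k 0], k)]).length : Int) = room
      · rw [bInner, if_pos heq]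
        simp only [List.length_append, List.length_cons, List.length_nil] at heq
        have h1 : (room - (nxt.length : Int)).toNat = 1 := by omega
        rw [List.map_cons, h1, List.take_succ_cons, List.take_zero]
        refine Prod.ext ?_ ?_
        · simp
        · exact (decide_eq_true (by
            simp only [List.length_cons] at heq ⊢
            push_cast at heq ⊢
            omega)).symm
      · rw [bInner, if_neg heq]
        simp only [List.length_append, List.length_cons, List.length_nil] at heq
        have h2 : ((nxt ++ [(c ++ [PySem.List.pyGetD sites k 0], k)]).length : Int) < room := by
          simp only [List.length_append, List.length_cons, List.length_nil]
          push_cast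
          omega
        rw [ih _ h2]
        have h3 : (room - (nxt.length : Int)).toNat
            = ((room - ((nxt ++ [(c ++ [PySem.List.pyGetD sites k 0], k)]).length : Int)).toNat) + 1 := by
          simp only [List.length_append, List.length_cons, List.length_nil]
          push_cast
          omega
        rw [List.map_cons, h3, List.take_succ_cons]
        refine Prod.ext ?_ ?_
        · simp
        · simp only [decide_eq_decide, List.length_append, List.length_cons, List.length_nil]
          push_cast
          omega

theorem bNext_spec (sites : List Int) (room : Int) :
    ∀ (L : List (List Int × Int)) (nxt : List (List Int × Int)), (nxt.length : Int) < room →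
      bNext sites room L nxt = nxt ++ (fullNext sites L).take (room - (nxt.length : Int)).toNat := by
  intro L
  induction L with
  | nil => intro nxt h; simp [bNext, fullNext]
  | cons q rest ih =>
      intro nxt h
      rw [bNext]
      simp only [bInner_spec sites room q.1 _ nxt h]
      set E := extIdx sites q.1 (q.2 + 1) with hE
      have hEdef : (PySem.List.pyRange (q.2 + 1) (sites.length : Int) 1).map
          (fun k => (q.1 ++ [PySem.List.pyGetD sites k 0], k)) = E := rfl
      have hElen : ((PySem.List.pyRange (q.2 + 1) (sites.length : Int) 1).length : Int)
          = (E.length : Int) := by rw [← hEdef, List.length_map]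
      rw [hEdef, fullNext, List.flatMap_cons]
      by_cases hflag : room ≤ (nxt.length : Int)
          + ((PySem.List.pyRange (q.2 + 1) (sites.length : Int) 1).length : Int)
      · simp only [hflag, decide_true, if_true]
        rw [List.take_append]
        have hz : (room - (nxt.length : Int)).toNat - E.length = 0 := by
          rw [hElen] at hflag
          omega
        rw [hz, List.take_zero, List.append_nil]
      · simp only [hflag, decide_false, Bool.false_eq_true, if_false]
        rw [hElen] at hflag
        have hfull : E.length ≤ (room - (nxt.length : Int)).toNat := by omega
        rw [List.take_of_length_le hfull]
        have h2 : (((nxt ++ E).length : Int)) < room := by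
          simp only [List.length_append]
          push_cast
          omega
        have hcount : (room - (((nxt ++ E).length : Nat) : Int)).toNat
            = (room - (nxt.length : Int)).toNat - E.length := by
          rw [List.length_append]
          push_cast
          omega
        rw [ih _ h2, List.take_append, List.take_of_length_le hfull, List.append_assoc, hcount, hE]
        rfl

-- once the cap is reached the loop returns immediately
theorem bLoop_stop (sites : List Int) (mc : Int) (fuel : Nat)
    (result : List (List Int)) (layer : List (List Int × Int))
    (h : mc ≤ (result.length : Int)) : bLoop sites mc fuel result layer = result := by
  cases fuel with
  | zero => rfl
  | succ f => rw [bLoop, if_pos (Or.inl h)]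

-- B's capped layered loop equals one flat slice of layersCat on the abstracted layer
theorem bLoop_eq (sites : List Int) (mc : Int) :
    ∀ (fuel : Nat) (result : List (List Int)) (layer : List (List Int × Int)),
      (∀ p ∈ layer, 0 ≤ p.2) →
      bLoop sites mc fuel result layer
        = result ++ (layersCat fuel (layAbs sites layer)).take (mc - (result.length : Int)).toNat := by
  intro fuel
  induction fuel with
  | zero => intro result layer _; simp [bLoop, layersCat]
  | succ f ih =>
      intro result layer hlay
      by_cases hcap : mc ≤ (result.length : Int)
      · have hz : (mc - (result.length : Int)).toNat = 0 := by omega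
        rw [bLoop, if_pos (Or.inl hcap), hz, List.take_zero, List.append_nil]
      · by_cases hnil : layer = []
        · subst hnil
          rw [bLoop, if_pos (Or.inr rfl)]
          simp [layAbs, layersCat_nil]
        · rw [bLoop, if_neg (by simp [hcap, hnil])]
          have hroom : (0 : Int) < mc - (result.length : Int) := by omega
          have hb := bNext_spec sites (mc - (result.length : Int)) layer []
            (by simp only [List.length_nil]; push_cast; omega)
          simp only [List.length_nil, Int.natCast_zero, sub_zero, List.nil_append] at hb
          simp only [hb]
          set F := fullNext sites layer with hF
          set r := (mc - (result.length : Int)).toNat with hr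
          have hFabs : layAbs sites F = (layAbs sites layer).flatMap (fun p => bExt p.1 p.2) :=
            fullNext_abs sites layer hlay
          have hFinv : ∀ p ∈ F, 0 ≤ p.2 := fullNext_nonneg sites layer hlay
          simp only [layersCat, ← hFabs]
          by_cases hbig : F.length ≤ r
          · rw [List.take_of_length_le hbig, ih _ _ hFinv, List.take_append, layAbs_fst]
            have h1 : (F.map Prod.fst).length ≤ r := by
              rw [List.length_map]
              omega
            have h2 : (mc - (((result ++ F.map Prod.fst).length : Nat) : Int)).toNat
                = r - (F.map Prod.fst).length := by
              rw [List.length_append, List.length_map]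
              push_cast
              omega
            rw [List.take_of_length_le h1, List.append_assoc, h2]
          · have htake_inv : ∀ p ∈ F.take r, 0 ≤ p.2 := fun p hp =>
              hFinv p ((List.take_sublist r F).subset hp)
            have hlen : (F.take r).length = r := by
              rw [List.length_take]
              omega
            have hstop : mc ≤ ((result ++ (F.take r).map Prod.fst).length : Int) := by
              simp only [List.length_append, List.length_map, hlen]
              omega
            have h3 : r - (F.map Prod.fst).length = 0 := by
              rw [List.length_map]
              omega
            rw [bLoop_stop sites mc f _ _ hstop, List.take_append, layAbs_fst, h3,
              List.take_zero, List.append_nil, List.map_take]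

-- A's append-in-loop candidate collection equals B's filterMap comprehension
theorem foldl_ite_append_filterMap (p : Int × Char → Bool) (f : Int × Char → Int) :
    ∀ (l : List (Int × Char)) (acc : List Int),
      l.foldl (fun acc x => if p x then acc ++ [f x] else acc) acc
        = acc ++ l.filterMap (fun x => if p x then some (f x) else none) := by
  intro l
  induction l with
  | nil => intro acc; simp
  | cons x xs ih =>
      intro acc
      by_cases h : p x = true <;> simp [List.foldl_cons, h, ih]

-- A's capped stateful loop equals one flat slice of the concatenation
theorem foldl_cap (C : Int → List (List Int)) (mc : Int) :
    ∀ (ns : List Int) (acc : List (List Int)),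
      ns.foldl
        (fun ms n =>
          if mc ≤ (ms.length : Int) then ms
          else ms ++ (C n).take (mc - (ms.length : Int)).toNat) acc
        = acc ++ (ns.flatMap C).take (mc - (acc.length : Int)).toNat := by
  intro ns
  induction ns with
  | nil => intro acc; simp
  | cons n ns ih =>
      intro acc
      by_cases h : mc ≤ (acc.length : Int)
      · have hz : (mc - (acc.length : Int)).toNat = 0 := by omega
        rw [List.foldl_cons, if_pos h, ih, hz, List.take_zero, List.append_nil,
          List.take_zero, List.append_nil]
      · simp only [List.foldl_cons, if_neg h, ih]
        rw [List.flatMap_cons, List.take_append, List.append_assoc]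
        congr 2
        congr 1
        simp only [List.length_append, List.length_take]
        omega

-- A's range of orders, flat-mapped, as List.range
theorem flatMap_pyRange_orders (sites : List Int) (mvm : Int) :
    (PySem.List.pyRange 2 (mvm + 1) 1).flatMap (fun n => pyCombinations sites n.toNat)
      = (List.range (mvm - 1).toNat).flatMap (fun i => pyCombinations sites (1 + 1 + i)) := by
  rw [PySem.List.pyRange_one, List.flatMap_map]
  have hlen : (mvm + 1 - 2).toNat = (mvm - 1).toNat := by omega
  rw [hlen]
  congr 1

-- B's initial layer abstracts to the size-1 combos with their tails
theorem bExt_nil (r : List Int) : bExt [] r = pyCombR r 1 := by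
  rw [bExt_eq]
  simp

theorem layAbs_init (sites : List Int) :
    layAbs sites ((PySem.List.enumerate sites 0).map (fun p => ([p.2], p.1)))
      = pyCombR sites 1 := by
  have h := extIdx_abs sites [] sites.length 0 le_rfl (by simp)
  simp only [Int.toNat_zero, List.drop_zero, bExt_nil] at h
  rw [← h, PySem.List.enumerate_eq_map_pyRange sites (0 : Int)]
  unfold layAbs extIdx
  simp [List.map_map, Function.comp]

theorem init_nonneg (sites : List Int) :
    ∀ p ∈ (PySem.List.enumerate sites 0).map (fun p => ([p.2], p.1)), 0 ≤ p.2 := by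
  intro p hp
  rw [PySem.List.enumerate_eq_map_pyRange sites (0 : Int), List.map_map, List.mem_map] at hp
  obtain ⟨j, hj, rfl⟩ := hp
  rw [PySem.List.mem_pyRange_one] at hj
  simpa using hj.1

-- ===== VERDICT =====
theorem get_var_mod_sites_spec : Claim_equal_get_var_mod_sites := by
  intro sequence target_mod_aas max_var_mod max_combs _
  unfold Spec_get_var_mod_sites get_var_mod_sites get_var_mod_sites_alt get_candidate_sites
  rw [foldl_ite_append_filterMap, List.nil_append]
  set sites : List Int := (PySem.List.enumerate sequence.toList 0).filterMap
    (fun p => if target_mod_aas.toList.contains p.2 then some (p.1 + 1) else none) with hsites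
  rw [foldl_cap, bLoop_eq sites max_combs _ _ _ (init_nonneg sites), layAbs_init,
    layersCat_pyCombR sites (max_var_mod - 1).toNat 1, flatMap_pyRange_orders sites max_var_mod]
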